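-- pv_equiv track=rewrite | github.com/kong-hana01/Coding-Test | 구현/정리완료/모노미노도미노2.py | search_light_color
-- ===== SOURCE A (Python) =====
-- def move_block(blue, green, move):
--     for tile, index in move:
--         if tile == 0:
--             green = [[green[i-1][j] if 0 < i <= index else green[i][j] for j in range(4)] for i in range(6)]
--             for i in range(4):
--                 green[0][i] = 0
--         else:
--             blue = [[blue[i][j-1] if 0 < j <= index else blue[i][j] for j in range(6)] for i in range(4)]
--             for i in range(4):
--                 blue[i][0] = 0
--
--     return green, blue
--
-- def search_light_color(blue, green):
--     move = []
--     for i in range(2):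
--         for j in range(4):
--             if green[i][j]:
--                 move.append([0, 5])
--                 break
--
--     for i in range(2):
--         for j in range(4):
--             if blue[j][i]:
--                 move.append([1, 5])
--                 break
--     green, blue = move_block(blue, green, move)
--     return green, blue
-- ===== SOURCE B (Python) =====
-- def search_light_color(blue, green):
--     # count how many of green's top two rows / blue's left two columns carry a light,
--     # then apply that many fixed board-normalizing shifts expressed by slicing
--     g_shifts = sum(1 for i in range(2) if any(green[i][j] for j in range(4)))
--     b_shifts = sum(1 for i in range(2) if any(blue[j][i] for j in range(4)))
--     for _ in range(g_shifts):
--         green = [[0, 0, 0, 0]] + [green[i][:4] for i in range(5)]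
--     for _ in range(b_shifts):
--         blue = [[0] + blue[i][:5] for i in range(4)]
--     return green, blue
-- ===== Notes on version B (the rewrite author's own statement) =====
-- stated objective: simpler
-- what changed: Drops the move-recording list and the generic index-guarded grid-rebuild helper: B counts the lit top rows / left columns directly and applies that many fixed board-normalizing shifts written as slice concatenations ([[0,0,0,0]] + [row[:4] for row in green[:5]]; [0] + row[:5] per row of blue[:4]).
import Mathlib
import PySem

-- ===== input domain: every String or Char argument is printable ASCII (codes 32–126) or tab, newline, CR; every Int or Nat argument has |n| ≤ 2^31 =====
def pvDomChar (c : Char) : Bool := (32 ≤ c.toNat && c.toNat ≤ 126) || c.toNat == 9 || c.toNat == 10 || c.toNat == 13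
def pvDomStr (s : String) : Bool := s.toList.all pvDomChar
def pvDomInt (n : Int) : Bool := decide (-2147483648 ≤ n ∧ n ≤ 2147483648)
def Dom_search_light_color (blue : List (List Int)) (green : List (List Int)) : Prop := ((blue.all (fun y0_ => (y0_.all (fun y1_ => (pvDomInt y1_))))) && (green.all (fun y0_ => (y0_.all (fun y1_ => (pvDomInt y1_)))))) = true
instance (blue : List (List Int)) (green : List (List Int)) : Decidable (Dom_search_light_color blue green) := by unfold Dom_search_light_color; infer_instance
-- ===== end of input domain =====

-- B replaces A's move-recording list and generic index-guarded grid rebuild by counting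
-- the lit top rows / left columns and applying that many fixed slice-built shifts (simpler decomposition).


-- ===== PORT A =====
-- total 2-d indexing xs[i][j]; under Pre_ every index the Python reaches is in range,
-- so the default 0 never stands for an access Python performs (exact there)
def pvAt (xs : List (List Int)) (i j : Int) : Int :=
  (((PySem.List.pyGet? xs i).bind (fun r => PySem.List.pyGet? r j)).getD 0)

-- 'for j in …: if f j: …; break' — true iff the loop broke (appended a move)
def pvFirstLight (js : List Int) (f : Int → Int) : Bool :=
  match js with
  | [] => false
  | j :: rest => if f j ≠ 0 then true else pvFirstLight rest f

-- the tile-0 body: the comprehension over range(6)×range(4), then 'for i in range(4): green[0][i] = 0'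
-- (List.set/modify are no-ops out of range; in range here since the built rows are literal)
def pvRebuildG (green : List (List Int)) (index : Int) : List (List Int) :=
  let g1 := (PySem.List.pyRange 0 6 1).map (fun i =>
    (PySem.List.pyRange 0 4 1).map (fun j =>
      if 0 < i ∧ i ≤ index then pvAt green (i-1) j else pvAt green i j))
  (PySem.List.pyRange 0 4 1).foldl (fun g i => g.modify 0 (fun r => r.set i.toNat 0)) g1

-- the tile-1 body: the comprehension over range(4)×range(6), then 'for i in range(4): blue[i][0] = 0'
def pvRebuildB (blue : List (List Int)) (index : Int) : List (List Int) :=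
  let b1 := (PySem.List.pyRange 0 4 1).map (fun i =>
    (PySem.List.pyRange 0 6 1).map (fun j =>
      if 0 < j ∧ j ≤ index then pvAt blue i (j-1) else pvAt blue i j))
  (PySem.List.pyRange 0 4 1).foldl (fun b i => b.modify i.toNat (fun r => r.set 0 0)) b1

def move_block (blue green : List (List Int)) (move : List (Int × Int)) : List (List Int) × List (List Int) :=
  match move with
  | [] => (green, blue)
  | (tile, index) :: rest =>
    if tile = 0 then move_block blue (pvRebuildG green index) rest
    else move_block (pvRebuildB blue index) green rest

def search_light_color (blue : List (List Int)) (green : List (List Int)) : List (List Int) × List (List Int) :=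
  let move : List (Int × Int) :=
    (PySem.List.pyRange 0 2 1).foldl (fun m i =>
      if pvFirstLight (PySem.List.pyRange 0 4 1) (fun j => pvAt green i j) then m ++ [(0, 5)] else m) []
  let move :=
    (PySem.List.pyRange 0 2 1).foldl (fun m i =>
      if pvFirstLight (PySem.List.pyRange 0 4 1) (fun j => pvAt blue j i) then m ++ [(1, 5)] else m) move
  move_block blue green move

-- ===== PORT B =====
-- [[0,0,0,0]] + [green[i][:4] for i in range(5)]; green[i] via pyGet? (getD default
-- unused: i is in range whenever the Python's own indexing succeeded)
def pvShiftDown (g : List (List Int)) : List (List Int) :=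
  [[0, 0, 0, 0]] ++ (PySem.List.pyRange 0 5 1).map (fun i => ((PySem.List.pyGet? g i).getD []).take 4)
-- [[0] + blue[i][:5] for i in range(4)]
def pvShiftRight (b : List (List Int)) : List (List Int) :=
  (PySem.List.pyRange 0 4 1).map (fun i => 0 :: ((PySem.List.pyGet? b i).getD []).take 5)

def search_light_color_alt (blue : List (List Int)) (green : List (List Int)) : List (List Int) × List (List Int) :=
  let gShifts := (PySem.List.pyRange 0 2 1).countP (fun i => (PySem.List.pyRange 0 4 1).any (fun j => pvAt green i j != 0))
  let bShifts := (PySem.List.pyRange 0 2 1).countP (fun i => (PySem.List.pyRange 0 4 1).any (fun j => pvAt blue j i != 0))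
  (pvShiftDown^[gShifts] green, pvShiftRight^[bShifts] blue)

-- ===== PRECONDITION & SPEC =====
-- Pre_ is exactly the set of inputs on which the Python A returns (elsewhere it raises IndexError):
-- both scans can run to a light or to their end (rows/columns long enough or a light before the short
-- end), and if a region is lit the corresponding board is large enough for the fixed-range rebuild.
def Pre_search_light_color (blue : List (List Int)) (green : List (List Int)) : Prop :=
  (∀ i < 2, i < green.length ∧ (4 ≤ (green.getD i []).length ∨ ∃ x ∈ green.getD i [], x ≠ 0))
  ∧ (∀ i < 2, (∀ j < 4, j < blue.length ∧ i < (blue.getD j []).length)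
      ∨ ∃ j < 4, (∀ k ≤ j, k < blue.length ∧ i < (blue.getD k []).length) ∧ (blue.getD j []).getD i 0 ≠ 0)
  ∧ ((∃ i < 2, ∃ j < 4, (green.getD i []).getD j 0 ≠ 0) →
      5 ≤ green.length ∧ ∀ i < 5, 4 ≤ (green.getD i []).length)
  ∧ ((∃ j < 4, ∃ i < 2, (blue.getD j []).getD i 0 ≠ 0) →
      4 ≤ blue.length ∧ ∀ j < 4, 5 ≤ (blue.getD j []).length)
instance (blue : List (List Int)) (green : List (List Int)) : Decidable (Pre_search_light_color blue green) := by unfold Pre_search_light_color; infer_instance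
def pvWitness_search_light_color : List (List Int) × List (List Int) :=
  ([[0,0,0,0,0,0],[0,0,0,0,0,0],[1,0,0,0,0,0],[0,0,0,0,0,0]],
   [[0,1,0,0],[0,0,0,0],[0,0,0,0],[0,0,0,0],[0,0,0,0],[0,0,0,0]])
def Spec_search_light_color (blue : List (List Int)) (green : List (List Int)) (out : List (List Int) × List (List Int)) : Prop := out = search_light_color_alt blue green
instance (blue : List (List Int)) (green : List (List Int)) (out : List (List Int) × List (List Int)) : Decidable (Spec_search_light_color blue green out) := by unfold Spec_search_light_color; infer_instance

-- ===== CLAIM (what is proved, stated in full; the proofs are below) =====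
def Claim_equal_search_light_color : Prop := ∀ (blue : List (List Int)) (green : List (List Int)), Dom_search_light_color blue green → Pre_search_light_color blue green → Spec_search_light_color blue green (search_light_color blue green)

-- ===== LEMMAS AND PROOFS =====

lemma pvFirstLight_eq_any (js : List Int) (f : Int → Int) :
    pvFirstLight js f = js.any (fun j => f j != 0) := by
  induction js with
  | nil => rfl
  | cons j rest ih =>
    by_cases h : f j = 0 <;> simp [pvFirstLight, h, ih]

lemma pvExists4 {α : Type} (l : List α) (h : 4 ≤ l.length) :
    ∃ a b c d rest, l = a :: b :: c :: d :: rest := by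
  match l, h with
  | a :: b :: c :: d :: rest, _ => exact ⟨a, b, c, d, rest, rfl⟩

lemma pvExists5 {α : Type} (l : List α) (h : 5 ≤ l.length) :
    ∃ a b c d e rest, l = a :: b :: c :: d :: e :: rest := by
  match l, h with
  | a :: b :: c :: d :: e :: rest, _ => exact ⟨a, b, c, d, e, rest, rfl⟩

lemma pvE4 : PySem.List.pyRange 0 4 1 = [0, 1, 2, 3] := by decide

lemma pvE5 : PySem.List.pyRange 0 5 1 = [0, 1, 2, 3, 4] := by decide

-- a non-default non-zero pvAt access certifies an in-range non-zero entry
lemma pvAt_ne (xs : List (List Int)) (i j : Int) (hi : 0 ≤ i) (hj : 0 ≤ j)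
    (h : pvAt xs i j ≠ 0) : (xs.getD i.toNat []).getD j.toNat 0 ≠ 0 := by
  unfold pvAt at h
  rw [PySem.List.pyGet?_of_nonneg xs hi] at h
  cases hx : xs[i.toNat]? with
  | none => rw [hx] at h; simp at h
  | some r =>
    rw [hx, Option.bind_some, PySem.List.pyGet?_of_nonneg r hj] at h
    cases hy : r[j.toNat]? with
    | none => rw [hy] at h; simp at h
    | some x =>
      rw [hy] at h
      simp only [Option.getD_some] at h
      have hrow : xs.getD i.toNat [] = r := by
        rw [List.getD_eq_getElem?_getD, hx]; rfl
      rw [hrow, List.getD_eq_getElem?_getD, hy, Option.getD_some]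
      exact h

-- a lit row scan certifies the existential Pre_'s shape implications consume
lemma pvCondLitG (xs : List (List Int)) (i : Int) (hi : 0 ≤ i)
    (h : ((PySem.List.pyRange 0 4 1).any fun j => pvAt xs i j != 0) = true) :
    ∃ j < 4, (xs.getD i.toNat []).getD j 0 ≠ 0 := by
  rw [pvE4] at h
  simp only [List.any_cons, List.any_nil, Bool.or_eq_true, bne_iff_ne, ne_eq, Bool.or_false] at h
  rcases h with h | h | h | h
  · exact ⟨0, by omega, pvAt_ne xs i 0 hi (by norm_num) h⟩
  · exact ⟨1, by omega, pvAt_ne xs i 1 hi (by norm_num) h⟩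
  · exact ⟨2, by omega, pvAt_ne xs i 2 hi (by norm_num) h⟩
  · exact ⟨3, by omega, pvAt_ne xs i 3 hi (by norm_num) h⟩

-- a lit column scan certifies the existential Pre_'s shape implications consume
lemma pvCondLitB (xs : List (List Int)) (i : Int) (hi : 0 ≤ i)
    (h : ((PySem.List.pyRange 0 4 1).any fun j => pvAt xs j i != 0) = true) :
    ∃ j < 4, (xs.getD j []).getD i.toNat 0 ≠ 0 := by
  rw [pvE4] at h
  simp only [List.any_cons, List.any_nil, Bool.or_eq_true, bne_iff_ne, ne_eq, Bool.or_false] at h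
  rcases h with h | h | h | h
  · exact ⟨0, by omega, pvAt_ne xs 0 i (by norm_num) hi h⟩
  · exact ⟨1, by omega, pvAt_ne xs 1 i (by norm_num) hi h⟩
  · exact ⟨2, by omega, pvAt_ne xs 2 i (by norm_num) hi h⟩
  · exact ⟨3, by omega, pvAt_ne xs 3 i (by norm_num) hi h⟩

-- A's tile-0 rebuild of a green with ≥5 rows of length ≥4 IS the slice-built down-shift
lemma pvRebuildG_eq (green : List (List Int))
    (h5 : 5 ≤ green.length) (h4 : ∀ i < 5, 4 ≤ (green.getD i []).length) :
    pvRebuildG green 5 = pvShiftDown green := by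
  obtain ⟨g0, g1, g2, g3, g4, tail, rfl⟩ := pvExists5 green h5
  obtain ⟨p0, p1, p2, p3, rp, rfl⟩ := pvExists4 g0 (by simpa using h4 0 (by omega))
  obtain ⟨q0, q1, q2, q3, rq, rfl⟩ := pvExists4 g1 (by simpa using h4 1 (by omega))
  obtain ⟨r0, r1, r2, r3, rr, rfl⟩ := pvExists4 g2 (by simpa using h4 2 (by omega))
  obtain ⟨s0, s1, s2, s3, rs, rfl⟩ := pvExists4 g3 (by simpa using h4 3 (by omega))
  obtain ⟨t0, t1, t2, t3, rt, rfl⟩ := pvExists4 g4 (by simpa using h4 4 (by omega))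
  have e6 : PySem.List.pyRange 0 6 1 = [0, 1, 2, 3, 4, 5] := by decide
  simp only [pvRebuildG, pvShiftDown, e6, pvE4, pvE5, List.map_cons, List.map_nil,
    List.foldl_cons, List.foldl_nil]
  norm_num [pvAt, PySem.List.pyGet?_of_nonneg,
    show Int.toNat 0 = 0 from rfl, show Int.toNat 1 = 1 from rfl,
    show Int.toNat 2 = 2 from rfl, show Int.toNat 3 = 3 from rfl,
    show Int.toNat 4 = 4 from rfl, show Int.toNat 5 = 5 from rfl]

-- A's tile-1 rebuild of a blue with ≥4 rows of length ≥5 IS the slice-built right-shift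
lemma pvRebuildB_eq (blue : List (List Int))
    (h4 : 4 ≤ blue.length) (h6 : ∀ j < 4, 5 ≤ (blue.getD j []).length) :
    pvRebuildB blue 5 = pvShiftRight blue := by
  obtain ⟨b0, b1, b2, b3, tail, rfl⟩ := pvExists4 blue h4
  obtain ⟨a0, a1, a2, a3, a4, ra, rfl⟩ := pvExists5 b0 (by simpa using h6 0 (by omega))
  obtain ⟨c0, c1, c2, c3, c4, rc, rfl⟩ := pvExists5 b1 (by simpa using h6 1 (by omega))
  obtain ⟨d0, d1, d2, d3, d4, rd, rfl⟩ := pvExists5 b2 (by simpa using h6 2 (by omega))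
  obtain ⟨e0, e1, e2, e3, e4, re, rfl⟩ := pvExists5 b3 (by simpa using h6 3 (by omega))
  have e6 : PySem.List.pyRange 0 6 1 = [0, 1, 2, 3, 4, 5] := by decide
  simp only [pvRebuildB, pvShiftRight, e6, pvE4, List.map_cons, List.map_nil,
    List.foldl_cons, List.foldl_nil]
  norm_num [pvAt, PySem.List.pyGet?_of_nonneg,
    show Int.toNat 0 = 0 from rfl, show Int.toNat 1 = 1 from rfl,
    show Int.toNat 2 = 2 from rfl, show Int.toNat 3 = 3 from rfl,
    show Int.toNat 4 = 4 from rfl, show Int.toNat 5 = 5 from rfl]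

lemma pvShiftDown_shape (g : List (List Int)) (h5 : 5 ≤ g.length)
    (h4 : ∀ i < 5, 4 ≤ (g.getD i []).length) :
    5 ≤ (pvShiftDown g).length ∧ ∀ i < 5, 4 ≤ ((pvShiftDown g).getD i []).length := by
  obtain ⟨g0, g1, g2, g3, g4, tail, rfl⟩ := pvExists5 g h5
  have hlit : pvShiftDown (g0 :: g1 :: g2 :: g3 :: g4 :: tail)
      = [[0, 0, 0, 0], g0.take 4, g1.take 4, g2.take 4, g3.take 4, g4.take 4] := by
    norm_num [pvShiftDown, pvE5, PySem.List.pyGet?_of_nonneg,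
      show Int.toNat 0 = 0 from rfl, show Int.toNat 1 = 1 from rfl,
      show Int.toNat 2 = 2 from rfl, show Int.toNat 3 = 3 from rfl,
      show Int.toNat 4 = 4 from rfl]
  rw [hlit]
  refine ⟨by simp, ?_⟩
  intro i hi
  have e0 := h4 0 (by omega)
  have e1 := h4 1 (by omega)
  have e2 := h4 2 (by omega)
  have e3 := h4 3 (by omega)
  simp only [List.getD_eq_getElem?_getD] at e0 e1 e2 e3 ⊢
  interval_cases i <;> simp_all [List.length_take]

lemma pvShiftRight_shape (b : List (List Int)) (h4 : 4 ≤ b.length)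
    (h6 : ∀ j < 4, 5 ≤ (b.getD j []).length) :
    4 ≤ (pvShiftRight b).length ∧ ∀ j < 4, 5 ≤ ((pvShiftRight b).getD j []).length := by
  obtain ⟨b0, b1, b2, b3, tail, rfl⟩ := pvExists4 b h4
  have hlit : pvShiftRight (b0 :: b1 :: b2 :: b3 :: tail)
      = [0 :: b0.take 5, 0 :: b1.take 5, 0 :: b2.take 5, 0 :: b3.take 5] := by
    norm_num [pvShiftRight, pvE4, PySem.List.pyGet?_of_nonneg,
      show Int.toNat 0 = 0 from rfl, show Int.toNat 1 = 1 from rfl,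
      show Int.toNat 2 = 2 from rfl, show Int.toNat 3 = 3 from rfl]
  rw [hlit]
  refine ⟨by simp, ?_⟩
  intro j hj
  have e0 := h6 0 (by omega)
  have e1 := h6 1 (by omega)
  have e2 := h6 2 (by omega)
  have e3 := h6 3 (by omega)
  simp only [List.getD_eq_getElem?_getD] at e0 e1 e2 e3 ⊢
  interval_cases j <;> simp_all [List.length_take]

-- a run of m tile-0 moves then n tile-1 moves is m down-shifts of green and n right-shifts of blue
lemma pvRun (blue green : List (List Int)) (m n : Nat)
    (hb : n = 0 ∨ (4 ≤ blue.length ∧ ∀ j < 4, 5 ≤ (blue.getD j []).length))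
    (hg : m = 0 ∨ (5 ≤ green.length ∧ ∀ i < 5, 4 ≤ (green.getD i []).length)) :
    move_block blue green
        (List.replicate m ((0 : Int), (5 : Int)) ++ List.replicate n ((1 : Int), (5 : Int)))
      = (pvShiftDown^[m] green, pvShiftRight^[n] blue) := by
  induction m generalizing green with
  | succ m ihm =>
    obtain hg | ⟨h5, h4⟩ := hg
    · omega
    rw [List.replicate_succ, List.cons_append]
    show move_block blue (pvRebuildG green 5) _ = _
    rw [pvRebuildG_eq green h5 h4]
    rcases Nat.eq_zero_or_pos m with rfl | _
    · rw [ihm _ (Or.inl rfl), Function.iterate_succ_apply]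
    · obtain ⟨h5', h4'⟩ := pvShiftDown_shape green h5 h4
      rw [ihm _ (Or.inr ⟨h5', h4'⟩), Function.iterate_succ_apply]
  | zero =>
    induction n generalizing blue with
    | zero => rfl
    | succ n ihn =>
      obtain hb | ⟨h4, h6⟩ := hb
      · omega
      rw [List.replicate_zero, List.nil_append, List.replicate_succ]
      show move_block (pvRebuildB blue 5) green _ = _
      rw [pvRebuildB_eq blue h4 h6]
      obtain ⟨h4', h6'⟩ := pvShiftRight_shape blue h4 h6
      rcases Nat.eq_zero_or_pos n with rfl | _
      · have := ihn (pvShiftRight blue) (Or.inl rfl)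
        rw [List.replicate_zero, List.nil_append] at this
        rw [this, Function.iterate_succ_apply]
      · have := ihn (pvShiftRight blue) (Or.inr ⟨h4', h6'⟩)
        rw [List.replicate_zero, List.nil_append] at this
        rw [this, Function.iterate_succ_apply]

-- ===== VERDICT (by name: the statement is the Claim_ definition above) =====
theorem search_light_color_spec : Claim_equal_search_light_color := by
  intro blue green _ hpre
  obtain ⟨_, _, hGshape, hBshape⟩ := hpre
  show Spec_search_light_color _ _ _
  unfold Spec_search_light_color search_light_color search_light_color_alt
  have e2 : PySem.List.pyRange 0 2 1 = [0, 1] := by decide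
  simp only [e2, List.foldl_cons, List.foldl_nil, List.countP_cons, List.countP_nil,
    pvFirstLight_eq_any]
  have hGs : (((PySem.List.pyRange 0 4 1).any fun j => pvAt green 0 j != 0) = true
        ∨ ((PySem.List.pyRange 0 4 1).any fun j => pvAt green 1 j != 0) = true) →
      5 ≤ green.length ∧ ∀ i < 5, 4 ≤ (green.getD i []).length := by
    intro hlit
    apply hGshape
    rcases hlit with h | h
    · obtain ⟨j, hj, hne⟩ := pvCondLitG green 0 (by norm_num) h
      exact ⟨0, by omega, j, hj, hne⟩
    · obtain ⟨j, hj, hne⟩ := pvCondLitG green 1 (by norm_num) h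
      exact ⟨1, by omega, j, hj, hne⟩
  have hBs : (((PySem.List.pyRange 0 4 1).any fun j => pvAt blue j 0 != 0) = true
        ∨ ((PySem.List.pyRange 0 4 1).any fun j => pvAt blue j 1 != 0) = true) →
      4 ≤ blue.length ∧ ∀ j < 4, 5 ≤ (blue.getD j []).length := by
    intro hlit
    apply hBshape
    rcases hlit with h | h
    · obtain ⟨j, hj, hne⟩ := pvCondLitB blue 0 (by norm_num) h
      exact ⟨j, hj, 0, by omega, hne⟩
    · obtain ⟨j, hj, hne⟩ := pvCondLitB blue 1 (by norm_num) h
      exact ⟨j, hj, 1, by omega, hne⟩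
  by_cases hg0 : ((PySem.List.pyRange 0 4 1).any fun j => pvAt green 0 j != 0) = true <;>
  by_cases hg1 : ((PySem.List.pyRange 0 4 1).any fun j => pvAt green 1 j != 0) = true <;>
  by_cases hb0 : ((PySem.List.pyRange 0 4 1).any fun j => pvAt blue j 0 != 0) = true <;>
  by_cases hb1 : ((PySem.List.pyRange 0 4 1).any fun j => pvAt blue j 1 != 0) = true <;>
    simp only [hg0, hg1, hb0, hb1, List.nil_append] <;> norm_num
  · exact pvRun blue green 2 2 (Or.inr (hBs (Or.inl hb0))) (Or.inr (hGs (Or.inl hg0)))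
  · exact pvRun blue green 2 1 (Or.inr (hBs (Or.inl hb0))) (Or.inr (hGs (Or.inl hg0)))
  · exact pvRun blue green 2 1 (Or.inr (hBs (Or.inr hb1))) (Or.inr (hGs (Or.inl hg0)))
  · exact pvRun blue green 2 0 (Or.inl rfl) (Or.inr (hGs (Or.inl hg0)))
  · exact pvRun blue green 1 2 (Or.inr (hBs (Or.inl hb0))) (Or.inr (hGs (Or.inl hg0)))
  · exact pvRun blue green 1 1 (Or.inr (hBs (Or.inl hb0))) (Or.inr (hGs (Or.inl hg0)))
  · exact pvRun blue green 1 1 (Or.inr (hBs (Or.inr hb1))) (Or.inr (hGs (Or.inl hg0)))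
  · exact pvRun blue green 1 0 (Or.inl rfl) (Or.inr (hGs (Or.inl hg0)))
  · exact pvRun blue green 1 2 (Or.inr (hBs (Or.inl hb0))) (Or.inr (hGs (Or.inr hg1)))
  · exact pvRun blue green 1 1 (Or.inr (hBs (Or.inl hb0))) (Or.inr (hGs (Or.inr hg1)))
  · exact pvRun blue green 1 1 (Or.inr (hBs (Or.inr hb1))) (Or.inr (hGs (Or.inr hg1)))
  · exact pvRun blue green 1 0 (Or.inl rfl) (Or.inr (hGs (Or.inr hg1)))
  · exact pvRun blue green 0 2 (Or.inr (hBs (Or.inl hb0))) (Or.inl rfl)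
  · exact pvRun blue green 0 1 (Or.inr (hBs (Or.inl hb0))) (Or.inl rfl)
  · exact pvRun blue green 0 1 (Or.inr (hBs (Or.inr hb1))) (Or.inl rfl)
  · exact pvRun blue green 0 0 (Or.inl rfl) (Or.inl rfl)
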